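-- pv_equiv track=rewrite | github.com/anish1A1/Rental-Shop | SellEquip.py | calculate_rental_charge
-- ===== SOURCE A (Python) =====
-- def calculate_rental_charge(price, days_to_rent):
--     ranges = [(1, 5), (6, 10), (11, 15), (16, 20)]  # Day ranges and corresponding multipliers
--     charge = 0
--
--     for range_start, range_end in ranges:
--         if range_start <= days_to_rent <= range_end:
--             charge = price * (ranges.index((range_start, range_end)) + 1)
--             break
--
--     return charge
-- ===== SOURCE B (Python) =====
-- def calculate_rental_charge(price, days_to_rent):
--     # Build a day -> multiplier table once, then one lookup (0 for anything outside 1..20).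
--     table = {d: (d - 1) // 5 + 1 for d in range(1, 21)}
--     return price * table.get(days_to_rent, 0)
-- ===== Notes on version B (the rewrite author's own statement) =====
-- stated objective: simpler
-- what changed: Replaces the scan over day-range tuples with a ranges.index lookup inside the loop by a precomputed day->multiplier dict built from a closed-form formula, followed by a single .get with default 0.
import Mathlib
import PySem

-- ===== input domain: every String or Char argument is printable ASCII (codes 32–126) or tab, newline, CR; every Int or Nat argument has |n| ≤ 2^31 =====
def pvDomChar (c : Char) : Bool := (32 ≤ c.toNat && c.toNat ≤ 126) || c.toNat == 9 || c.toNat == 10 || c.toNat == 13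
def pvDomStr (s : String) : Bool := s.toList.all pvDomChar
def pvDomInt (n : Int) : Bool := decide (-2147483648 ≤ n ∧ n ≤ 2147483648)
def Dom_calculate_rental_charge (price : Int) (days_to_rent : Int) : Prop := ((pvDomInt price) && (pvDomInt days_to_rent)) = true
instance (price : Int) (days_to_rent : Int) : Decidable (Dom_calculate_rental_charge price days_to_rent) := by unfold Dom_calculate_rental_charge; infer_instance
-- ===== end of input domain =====

-- B replaces the range-tuple scan (with its inner ranges.index lookup) by a precomputed
-- day->multiplier dict and a single lookup with default 0; objective: simpler.


-- ===== PORT A =====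
-- the literal `ranges` list of A
def pvRanges : List (Int × Int) := [(1, 5), (6, 10), (11, 15), (16, 20)]

-- A's for-loop with break: on the first matching range, set charge via ranges.index and stop.
def pvLoopA (price days_to_rent : Int) : List (Int × Int) → Int → Int
  | [], charge => charge
  | (range_start, range_end) :: rest, charge =>
    if range_start ≤ days_to_rent ∧ days_to_rent ≤ range_end then
      match PySem.List.index? pvRanges (range_start, range_end) with
      | some i => price * ((i : Int) + 1)
      | none => charge   -- unreachable: the pair comes from pvRanges itself
    else pvLoopA price days_to_rent rest charge

def calculate_rental_charge (price : Int) (days_to_rent : Int) : Int :=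
  pvLoopA price days_to_rent pvRanges 0

-- ===== PORT B =====
def calculate_rental_charge_alt (price : Int) (days_to_rent : Int) : Int :=
  let table : PySem.Dict Int Int :=
    (PySem.List.pyRange 1 21 1).foldl
      (fun t d => t.insert d (PySem.Int.floordiv (d - 1) 5 + 1)) PySem.Dict.empty
  price * table.getD days_to_rent 0

-- ===== PRECONDITION & SPEC =====
def Spec_calculate_rental_charge (price : Int) (days_to_rent : Int) (out : Int) : Prop := out = calculate_rental_charge_alt price days_to_rent
instance (price : Int) (days_to_rent : Int) (out : Int) : Decidable (Spec_calculate_rental_charge price days_to_rent out) := by unfold Spec_calculate_rental_charge; infer_instance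

-- ===== CLAIM (what is proved, stated in full; the proofs are below) =====
def Claim_equal_calculate_rental_charge : Prop := ∀ (price : Int) (days_to_rent : Int), Dom_calculate_rental_charge price days_to_rent → Spec_calculate_rental_charge price days_to_rent (calculate_rental_charge price days_to_rent)

-- ===== LEMMAS AND PROOFS =====

-- The built table is the literal 20-entry dict; querying it at d is a cascade of
-- key comparisons, matched case by case against A's range scan.
theorem pv_table :
    (PySem.List.pyRange 1 21 1).foldl
      (fun t d => t.insert d (PySem.Int.floordiv (d - 1) 5 + 1)) PySem.Dict.empty
    = PySem.Dict.mk [(1,1),(2,1),(3,1),(4,1),(5,1),(6,2),(7,2),(8,2),(9,2),(10,2),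
        (11,3),(12,3),(13,3),(14,3),(15,3),(16,4),(17,4),(18,4),(19,4),(20,4)] := by
  decide

theorem pv_eq (price d : Int) :
    calculate_rental_charge price d = calculate_rental_charge_alt price d := by
  by_cases h : 1 ≤ d ∧ d ≤ 20
  · obtain ⟨h1, h2⟩ := h
    unfold calculate_rental_charge calculate_rental_charge_alt
    rw [pv_table]
    interval_cases d <;> simp [pvLoopA, pvRanges, PySem.List.index?,
      List.idxOf?, List.findIdx?, List.findIdx?.go,
      PySem.Dict.getD, PySem.Dict.get?, List.find?]
  · unfold calculate_rental_charge calculate_rental_charge_alt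
    rw [pv_table]
    simp only [pvLoopA, pvRanges, PySem.Dict.getD, PySem.Dict.get?, List.find?]
    repeat' split
    all_goals simp only [beq_iff_eq] at *
    all_goals first | (exfalso; omega) | simp

-- ===== VERDICT (by name: the statement is the Claim_ definition above) =====
theorem calculate_rental_charge_spec : Claim_equal_calculate_rental_charge := by
  intro price d _
  exact pv_eq price d
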